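-- pv_equiv track=rewrite | github.com/afiq-aswadi/kata-sr | katas/exercises/python_generators/reference.py | generator_pipeline
-- ===== SOURCE A (Python) =====
-- from typing import Iterator, List, Any, Union
--
-- def generator_pipeline(numbers: Iterator[int]) -> Iterator[int]:
--     """
--     Generator pipeline that chains multiple transformations.
--
--     Pipeline:
--     1. Square each number
--     2. Filter for even numbers
--     3. Double the result
--
--     Args:
--         numbers: Input numbers
--
--     Yields:
--         Transformed numbers
--
--     Example:
--         >>> list(generator_pipeline(range(5)))
--         [0, 8, 32]
--     """
--     # Stage 1: Square
--     def square_gen(nums):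
--         for n in nums:
--             yield n ** 2
--
--     # Stage 2: Filter even
--     def filter_even(nums):
--         for n in nums:
--             if n % 2 == 0:
--                 yield n
--
--     # Stage 3: Double
--     def double_gen(nums):
--         for n in nums:
--             yield n * 2
--
--     # Chain the pipeline
--     return double_gen(filter_even(square_gen(numbers)))
-- ===== SOURCE B (Python) =====
-- def generator_pipeline(numbers):
--     """Since n**2 is even exactly when n is even, filter on n's parity first
--     and emit 2*n*n only for even n (odd elements are never squared)."""
--     return (2 * n * n for n in numbers if n % 2 == 0)
-- ===== Notes on version B (the rewrite author's own statement) =====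
-- stated objective: alternative
-- what changed: Uses the number-theoretic fact that n**2 is even iff n is even: B filters on the input's parity before squaring and emits 2*n*n directly, instead of squaring every element and testing the square's parity; odd elements are never squared.
import Mathlib
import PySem

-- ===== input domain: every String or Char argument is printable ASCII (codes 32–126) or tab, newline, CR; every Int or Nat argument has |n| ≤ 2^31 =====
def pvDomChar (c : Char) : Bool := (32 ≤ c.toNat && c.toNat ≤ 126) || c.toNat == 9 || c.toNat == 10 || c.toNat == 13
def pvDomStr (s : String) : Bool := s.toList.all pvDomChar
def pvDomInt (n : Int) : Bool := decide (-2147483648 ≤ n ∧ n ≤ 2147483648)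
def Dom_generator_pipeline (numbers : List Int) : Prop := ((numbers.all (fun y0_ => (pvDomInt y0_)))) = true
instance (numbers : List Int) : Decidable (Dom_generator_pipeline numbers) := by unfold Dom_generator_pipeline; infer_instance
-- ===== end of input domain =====

-- B exploits that n**2 is even iff n is even: it filters on the input's parity and squares
-- only the evens, instead of squaring everything and testing the square; objective: alternative.

-- ===== PORT A =====
-- Stage 1: square each element
def square_gen (nums : List Int) : List Int := nums.map (fun n => n ^ 2)
-- Stage 2: keep the even elements (Python n % 2 via PySem.Int.mod)
def filter_even (nums : List Int) : List Int := nums.filter (fun n => PySem.Int.mod n 2 == 0)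
-- Stage 3: double each element
def double_gen (nums : List Int) : List Int := nums.map (fun n => n * 2)

def generator_pipeline (numbers : List Int) : List Int :=
  double_gen (filter_even (square_gen numbers))

-- ===== PORT B =====
-- genexp: (2 * n * n for n in numbers if n % 2 == 0) — filter on n's parity, then map
def generator_pipeline_alt (numbers : List Int) : List Int :=
  (numbers.filter (fun n => PySem.Int.mod n 2 == 0)).map (fun n => 2 * n * n)

-- ===== PRECONDITION & SPEC =====
def Spec_generator_pipeline (numbers : List Int) (out : List Int) : Prop := out = generator_pipeline_alt numbers
instance (numbers : List Int) (out : List Int) : Decidable (Spec_generator_pipeline numbers out) := by unfold Spec_generator_pipeline; infer_instance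

-- ===== CLAIM (what is proved, stated in full; the proofs are below) =====
def Claim_equal_generator_pipeline : Prop := ∀ (numbers : List Int), Dom_generator_pipeline numbers → Spec_generator_pipeline numbers (generator_pipeline numbers)

-- ===== LEMMAS AND PROOFS =====
-- n² has the same parity as n (key fact behind B's filter-before-square)
theorem sq_mod_two (n : Int) : PySem.Int.mod (n ^ 2) 2 = PySem.Int.mod n 2 := by
  simp only [PySem.Int.mod]
  rw [Int.fmod_eq_emod, Int.fmod_eq_emod]
  have h2 : n ^ 2 % 2 = (n % 2) * (n % 2) % 2 := by rw [pow_two, Int.mul_emod]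
  rcases Int.emod_two_eq n with h | h <;> rw [h2, h] <;> norm_num

theorem pipeline_eq (numbers : List Int) :
    generator_pipeline numbers = generator_pipeline_alt numbers := by
  induction numbers with
  | nil => rfl
  | cons n rest ih =>
    simp only [generator_pipeline, generator_pipeline_alt, square_gen, filter_even, double_gen,
      List.map_cons, List.filter_cons, sq_mod_two] at *
    split_ifs with h
    · simp_all [pow_two]; ring
    · simp_all

-- ===== VERDICT (by name: the statement is the Claim_ definition above) =====
theorem generator_pipeline_spec : Claim_equal_generator_pipeline := by
  intro numbers _
  exact pipeline_eq numbers
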